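-- pv_equiv track=rewrite | github.com/deepika261/New_Backend | PythonScripts/OCR1.py | remove_letter_spacing
-- ===== SOURCE A (Python) =====
-- def remove_letter_spacing(text):
--     words = text.split()
--     joined_text = ""
--     temp_word = ""
--
--     for word in words:
--         if len(word) == 1:  # likely a letter in spaced handwriting
--             temp_word += word
--         else:
--             if temp_word:
--                 joined_text += temp_word + " "
--                 temp_word = ""
--             joined_text += word + " "
--
--     if temp_word:
--         joined_text += temp_word
--
--     return joined_text.strip()
-- ===== SOURCE B (Python) =====
-- def remove_letter_spacing(text):
--     words = text.split()
--     tokens = []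
--     i = 0
--     while i < len(words):
--         if len(words[i]) == 1:
--             j = i
--             while j < len(words) and len(words[j]) == 1:
--                 j += 1
--             tokens.append(''.join(words[i:j]))
--             i = j
--         else:
--             tokens.append(words[i])
--             i += 1
--     return ' '.join(tokens)
-- ===== Notes on version B (the rewrite author's own statement) =====
-- stated objective: alternative
-- what changed: B replaces A's running string accumulator with manual flushes and a final strip by a two-index run scan that collects output tokens (merged single-letter runs or whole words) and joins them once with a single-space separator.
import Mathlib
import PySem

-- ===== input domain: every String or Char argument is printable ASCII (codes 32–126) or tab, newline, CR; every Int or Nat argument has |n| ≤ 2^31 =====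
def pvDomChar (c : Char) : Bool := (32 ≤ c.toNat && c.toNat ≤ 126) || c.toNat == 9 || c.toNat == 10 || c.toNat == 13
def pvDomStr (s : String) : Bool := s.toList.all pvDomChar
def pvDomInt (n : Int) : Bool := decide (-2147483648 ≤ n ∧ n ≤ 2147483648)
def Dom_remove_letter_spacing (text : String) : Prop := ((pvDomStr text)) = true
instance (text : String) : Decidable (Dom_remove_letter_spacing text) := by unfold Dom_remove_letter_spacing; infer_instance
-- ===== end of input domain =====

-- B joins consecutive single-letter words by scanning each run to its end and assembling a
-- token list joined once with a single-space separator, instead of A's running string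
-- accumulator with manual flushes and a final strip (alternative decomposition, same linear cost).

-- ===== PORT A =====
def remove_letter_spacing (text : String) : String :=
  let words := PySem.Str.split₀ text
  let st := words.foldl
    (fun (st : String × String) word =>
      if PySem.Str.len word == 1 then (st.1, st.2 ++ word)
      else
        let joined := if st.2 ≠ "" then st.1 ++ st.2 ++ " " else st.1
        (joined ++ word ++ " ", ""))
    ("", "")
  let joined := if st.2 ≠ "" then st.1 ++ st.2 else st.1
  PySem.Str.strip joined

-- ===== PORT B =====
-- Source B's run scan 'while j < len(words) and len(words[j]) == 1: j += 1' with ''.join(words[i:j])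
-- is the takeWhile/dropWhile split at the end of the single-letter run.
def pvAltTokens : List String → List String
  | [] => []
  | w :: ws =>
    if h : PySem.Str.len w == 1 then
      PySem.Str.join "" (List.takeWhile (fun v => PySem.Str.len v == 1) (w :: ws)) ::
        pvAltTokens (List.dropWhile (fun v => PySem.Str.len v == 1) (w :: ws))
    else
      w :: pvAltTokens ws
termination_by ws => ws.length
decreasing_by
  · simp only [List.dropWhile_cons, h, if_true]
    exact Nat.lt_succ_of_le (List.length_dropWhile_le _ _)
  · simp

def remove_letter_spacing_alt (text : String) : String :=
  PySem.Str.join " " (pvAltTokens (PySem.Str.split₀ text))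

-- ===== PRECONDITION & SPEC =====
def Spec_remove_letter_spacing (text : String) (out : String) : Prop := out = remove_letter_spacing_alt text
instance (text : String) (out : String) : Decidable (Spec_remove_letter_spacing text out) := by unfold Spec_remove_letter_spacing; infer_instance

-- ===== CLAIM (what is proved, stated in full; the proofs are below) =====
def Claim_equal_remove_letter_spacing : Prop := ∀ (text : String), Dom_remove_letter_spacing text → Spec_remove_letter_spacing text (remove_letter_spacing text)

-- ===== LEMMAS AND PROOFS =====

-- Char-level mirrors of the two programs (proof-only helpers).
def pvGood (w : List Char) : Prop := w ≠ [] ∧ ∀ c ∈ w, PySem.Chars.isspace c = false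

def pvFC (st : List Char × List Char) (w : List Char) : List Char × List Char :=
  if w.length == 1 then (st.1, st.2 ++ w)
  else ((if st.2 ≠ [] then st.1 ++ st.2 ++ [' '] else st.1) ++ w ++ [' '], [])

def pvOpt (r : List Char) : List (List Char) := if r ≠ [] then [r] else []

def pvSp (ts : List (List Char)) : List Char := ts.flatMap (fun t => t ++ [' '])

def pvAbsT : List (List Char) → List Char → List (List Char)
  | [], _ => []
  | w :: ws, r => if w.length == 1 then pvAbsT ws (r ++ w) else pvOpt r ++ w :: pvAbsT ws []

def pvAbsR : List (List Char) → List Char → List Char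
  | [], r => r
  | w :: ws, r => if w.length == 1 then pvAbsR ws (r ++ w) else pvAbsR ws []

def pvTokP (r : List Char) : List (List Char) → List (List Char)
  | [] => pvOpt r
  | w :: ws => if w.length == 1 then pvTokP (r ++ w) ws else pvOpt r ++ w :: pvTokP [] ws

def pvAltTokensC : List (List Char) → List (List Char)
  | [] => []
  | w :: ws =>
    if h : w.length == 1 then
      PySem.Chars.join [] (List.takeWhile (fun v => v.length == 1) (w :: ws)) ::
        pvAltTokensC (List.dropWhile (fun v => v.length == 1) (w :: ws))
    else
      w :: pvAltTokensC ws
termination_by ws => ws.length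
decreasing_by
  · simp only [List.dropWhile_cons, h, if_true]
    exact Nat.lt_succ_of_le (List.length_dropWhile_le _ _)
  · simp

-- 1. Bridge A's String-level fold to the char-level fold.
set_option maxRecDepth 2000 in
theorem pv_fold_bridge (ws : List String) (s1 s2 : String) :
    (((ws.foldl
      (fun (st : String × String) word =>
        if PySem.Str.len word == 1 then (st.1, st.2 ++ word)
        else
          let joined := if st.2 ≠ "" then st.1 ++ st.2 ++ " " else st.1
          (joined ++ word ++ " ", "")) (s1, s2)).1.toList),
      ((ws.foldl
      (fun (st : String × String) word =>
        if PySem.Str.len word == 1 then (st.1, st.2 ++ word)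
        else
          let joined := if st.2 ≠ "" then st.1 ++ st.2 ++ " " else st.1
          (joined ++ word ++ " ", "")) (s1, s2)).2.toList))
    = (ws.map String.toList).foldl pvFC (s1.toList, s2.toList) := by
  induction ws generalizing s1 s2 with
  | nil => rfl
  | cons w ws ih =>
      simp only [List.foldl_cons, List.map_cons]
      by_cases h : PySem.Str.len w == 1
      · have h' : (w.toList.length == 1) = true := by
          simpa [PySem.Str.len, Int.natCast_inj] using h
        have hlen1 : w.length = 1 := by simpa using h'
        simp only [h, if_true]
        rw [ih]
        have hfc : pvFC (s1.toList, s2.toList) w.toList = (s1.toList, s2.toList ++ w.toList) := by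
          rw [pvFC, if_pos (show ((w.toList.length == 1) = true) by rw [h'])]
        rw [hfc]
        simp
      · have h' : (w.toList.length == 1) = false := by
          simpa [PySem.Str.len, Int.natCast_inj] using h
        have hlen : ¬ w.length = 1 := by simpa using h'
        simp only [h, if_false]
        rw [ih]
        congr 1
        rw [pvFC, if_neg (show ¬ ((w.toList.length == 1) = true) by rw [h']; simp)]
        by_cases hs : s2 = ""
        · have hs2 : s2.toList = [] := by simp [hs]
          rw [if_neg (show ¬ s2.toList ≠ [] by simpa using hs2)]
          rw [if_neg (show ¬ s2 ≠ "" by simpa using hs)]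
          simp
        · have hs' : s2.toList ≠ [] := by
            intro hc
            exact hs (String.toList_inj.mp hc)
          rw [if_pos (show s2.toList ≠ [] from hs')]
          rw [if_pos (show s2 ≠ "" from hs)]
          simp

-- 2. The char-level fold, abstracted to (finished tokens, pending run).
theorem pv_fold_abs (ws : List (List Char)) (s1 r : List Char) :
    ws.foldl pvFC (s1, r) = (s1 ++ pvSp (pvAbsT ws r), pvAbsR ws r) := by
  induction ws generalizing s1 r with
  | nil => simp [pvAbsT, pvAbsR, pvSp]
  | cons w ws ih =>
      by_cases h : w.length == 1
      · simp only [List.foldl_cons, pvFC, h, if_true]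
        rw [ih]
        simp [pvAbsT, pvAbsR, h]
      · simp only [List.foldl_cons, pvFC, h, if_false]
        rw [ih]
        simp only [pvAbsT, pvAbsR, h, if_false]
        by_cases hr : r = [] <;> simp [pvSp, pvOpt, hr]

-- 3. tokP is the finished-token list plus the flushed pending run.
theorem pv_tokP_abs (ws : List (List Char)) (r : List Char) :
    pvTokP r ws = pvAbsT ws r ++ pvOpt (pvAbsR ws r) := by
  induction ws generalizing r with
  | nil => simp [pvTokP, pvAbsT, pvAbsR]
  | cons w ws ih =>
      by_cases h : w.length == 1
      · simp [pvTokP, pvAbsT, pvAbsR, h, ih]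
      · simp [pvTokP, pvAbsT, pvAbsR, h, ih]

theorem pv_intercalate_nil (l : List (List Char)) : ([] : List Char).intercalate l = l.flatten := by
  induction l with
  | nil => simp [List.intercalate]
  | cons x l ih =>
      cases l with
      | nil => simp [List.intercalate]
      | cons y l' =>
          simpa [List.intercalate, List.intersperse] using ih

-- 4. tokP with empty pending run is B's run-splitting token list (proved jointly with
-- the statement for a nonempty pending run).
theorem pv_tokP_both (ws : List (List Char)) :
    pvTokP [] ws = pvAltTokensC ws ∧
    ∀ r : List Char, r ≠ [] →
      pvTokP r ws =
        (r ++ (List.takeWhile (fun v => v.length == 1) ws).flatten) ::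
          pvAltTokensC (List.dropWhile (fun v => v.length == 1) ws) := by
  induction ws with
  | nil =>
      constructor
      · simp [pvTokP, pvOpt, pvAltTokensC]
      · intro r hr
        simp [pvTokP, pvOpt, hr, pvAltTokensC]
  | cons w ws ih =>
      by_cases h : w.length == 1
      · have hw : w ≠ [] := by
          intro hc; simp [hc] at h
        have hrun : ∀ r : List Char, r ≠ [] →
            pvTokP r (w :: ws) =
              (r ++ (List.takeWhile (fun v => v.length == 1) (w :: ws)).flatten) ::
                pvAltTokensC (List.dropWhile (fun v => v.length == 1) (w :: ws)) := by
          intro r hr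
          rw [pvTokP, if_pos h, ih.2 (r ++ w) (by simp [hw])]
          simp [List.takeWhile_cons, List.dropWhile_cons, h]
        refine ⟨?_, hrun⟩
        rw [pvTokP, if_pos h, List.nil_append, ih.2 w hw]
        conv_rhs => rw [pvAltTokensC.eq_def]
        dsimp only
        rw [dif_pos h]
        simp [PySem.Chars.join, List.takeWhile_cons, h, pv_intercalate_nil]
      · have h'' : ¬ ((w.length == 1) = true) := by simpa using h
        have hstep : ∀ r : List Char,
            pvTokP r (w :: ws) = pvOpt r ++ w :: pvTokP [] ws := by
          intro r
          rw [pvTokP, if_neg h'']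
        have halt : pvAltTokensC (w :: ws) = w :: pvAltTokensC ws := by
          rw [pvAltTokensC.eq_def]
          dsimp only
          rw [dif_neg h'']
        constructor
        · rw [hstep, halt, ih.1]; simp [pvOpt]
        · intro r hr
          rw [hstep]
          simp [pvOpt, hr, List.takeWhile_cons, List.dropWhile_cons, h, halt, ih.1]

theorem pv_tokP_nil (ws : List (List Char)) :
    pvTokP [] ws = pvAltTokensC ws := (pv_tokP_both ws).1

-- 5. Words produced by split() are nonempty and whitespace-free.
theorem pv_split_go_good (s : List Char) (cur : List Char) (acc : List (List Char))
    (hacc : ∀ w ∈ acc, pvGood w) (hcur : ∀ c ∈ cur, PySem.Chars.isspace c = false) :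
    ∀ w ∈ PySem.Chars.split₀.go s cur acc, pvGood w := by
  induction s generalizing cur acc with
  | nil =>
      intro w hw
      by_cases hc : cur.isEmpty
      · simp [PySem.Chars.split₀.go, hc] at hw
        exact hacc w hw
      · simp [PySem.Chars.split₀.go, hc] at hw
        rcases hw with hw | hw
        · exact hacc w hw
        · subst hw
          refine ⟨by simpa [List.isEmpty_iff] using hc, ?_⟩
          intro c hc'
          exact hcur c (by simpa using hc')
  | cons c rest ih =>
      intro w hw
      by_cases hs : PySem.Chars.isspace c
      · by_cases hc : cur.isEmpty
        · rw [PySem.Chars.split₀.go] at hw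
          simp only [hs, if_true, hc] at hw
          exact ih [] acc hacc (by simp) w hw
        · rw [PySem.Chars.split₀.go] at hw
          simp only [hs, if_true, hc, if_false] at hw
          refine ih [] (cur.reverse :: acc) ?_ (by simp) w hw
          intro v hv
          rcases List.mem_cons.mp hv with hv | hv
          · subst hv
            refine ⟨by simpa [List.isEmpty_iff] using hc, ?_⟩
            intro d hd
            exact hcur d (by simpa using hd)
          · exact hacc v hv
      · rw [PySem.Chars.split₀.go] at hw
        simp only [hs, if_false] at hw
        refine ih (c :: cur) acc hacc ?_ w hw
        intro d hd
        rcases List.mem_cons.mp hd with hd | hd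
        · subst hd; simpa using hs
        · exact hcur d hd

theorem pv_split₀_good (s : List Char) :
    ∀ w ∈ PySem.Chars.split₀ s, pvGood w :=
  pv_split_go_good s [] [] (by simp) (by simp)

-- 6. Goodness of the tokens produced by tokP.
theorem pv_tokP_good (ws : List (List Char)) :
    ∀ r : List Char, (∀ c ∈ r, PySem.Chars.isspace c = false) →
    (∀ w ∈ ws, pvGood w) →
    ∀ t ∈ pvTokP r ws, pvGood t := by
  induction ws with
  | nil =>
      intro r hr _ tk htk
      simp only [pvTokP, pvOpt] at htk
      by_cases h : r = []
      · simp [h] at htk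
      · simp [h] at htk
        subst htk
        exact ⟨h, hr⟩
  | cons w ws ih =>
      intro r hr hws tk htk
      by_cases h : w.length == 1
      · rw [pvTokP, if_pos h] at htk
        refine ih (r ++ w) ?_ (fun v hv => hws v (by simp [hv])) tk htk
        intro c hc
        rcases List.mem_append.mp hc with hc | hc
        · exact hr c hc
        · exact (hws w (by simp)).2 c hc
      · rw [pvTokP, if_neg (by simpa using h)] at htk
        rcases List.mem_append.mp htk with htk | htk
        · simp only [pvOpt] at htk
          by_cases hr' : r = []
          · simp [hr'] at htk
          · simp [hr'] at htk; subst htk; exact ⟨hr', hr⟩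
        · rcases List.mem_cons.mp htk with htk | htk
          · subst htk; exact hws _ (by simp)
          · exact ih [] (by simp) (fun v hv => hws v (by simp [hv])) tk htk

-- 7. strip lemmas.
theorem pv_lstrip_good (t X : List Char) (ht : pvGood t) :
    PySem.Chars.lstrip (t ++ X) = t ++ X := by
  rcases ht with ⟨hne, hsp⟩
  cases t with
  | nil => exact absurd rfl hne
  | cons c cs =>
      simp [PySem.Chars.lstrip, List.dropWhile_cons, hsp c (by simp)]

theorem pv_rstrip_good (X r : List Char) (hne : r ≠ [])
    (hsp : ∀ c ∈ r, PySem.Chars.isspace c = false) :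
    PySem.Chars.rstrip (X ++ r) = X ++ r := by
  unfold PySem.Chars.rstrip
  rw [List.reverse_append]
  rcases List.eq_nil_or_concat r with h | ⟨rs, c, h⟩
  · exact absurd h hne
  · subst h
    simp [List.dropWhile_cons, hsp c (by simp)]

theorem pv_rstrip_space (X : List Char) :
    PySem.Chars.rstrip (X ++ [' ']) = PySem.Chars.rstrip X := by
  unfold PySem.Chars.rstrip
  simp [List.dropWhile_cons, PySem.Chars.isspace]

-- ' '.join of (T ++ [r]) appends a space after every token of T.
theorem pv_join_append_last (T : List (List Char)) (r : List Char) :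
    PySem.Chars.join [' '] (T ++ [r]) = pvSp T ++ r := by
  induction T with
  | nil => simp [PySem.Chars.join, pvSp, List.intercalate]
  | cons t T ih =>
      have step : PySem.Chars.join [' '] (t :: (T ++ [r]))
          = t ++ ' ' :: PySem.Chars.join [' '] (T ++ [r]) := by
        simp only [PySem.Chars.join, List.intercalate]
        cases T with
        | nil => simp [List.intersperse]
        | cons u T' => simp [List.intersperse]
      simp only [List.cons_append, step, ih, pvSp, List.flatMap_cons]
      simp

theorem pv_rstrip_sp (T : List (List Char)) (hT : ∀ t ∈ T, pvGood t) :
    PySem.Chars.rstrip (pvSp T) = PySem.Chars.join [' '] T := by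
  rcases List.eq_nil_or_concat T with h | ⟨T', t, h⟩
  · simp [h, pvSp, PySem.Chars.join, PySem.Chars.rstrip, List.intercalate]
  · subst h
    rw [List.concat_eq_append] at *
    have ht := hT t (by simp)
    have hsp : pvSp (T' ++ [t]) = (pvSp T' ++ t) ++ [' '] := by
      simp [pvSp]
    rw [hsp, pv_rstrip_space, pv_rstrip_good _ t ht.1 ht.2, pv_join_append_last]

theorem pv_strip_main (T : List (List Char)) (r : List Char)
    (hT : ∀ t ∈ T, pvGood t)
    (hr : ∀ c ∈ r, PySem.Chars.isspace c = false) :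
    PySem.Chars.strip (pvSp T ++ r) = PySem.Chars.join [' '] (T ++ pvOpt r) := by
  by_cases hrn : r = []
  · subst hrn
    simp only [List.append_nil, pvOpt, ne_eq, not_true_eq_false, if_false]
    unfold PySem.Chars.strip
    cases T with
    | nil => simp [pvSp, PySem.Chars.lstrip, PySem.Chars.rstrip, PySem.Chars.join,
        List.intercalate]
    | cons t T' =>
        have hform : pvSp (t :: T') = t ++ (' ' :: pvSp T') := by simp [pvSp]
        rw [hform, pv_lstrip_good t _ (hT t (by simp)), ← hform, pv_rstrip_sp _ hT]
  · unfold PySem.Chars.strip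
    have hls : PySem.Chars.lstrip (pvSp T ++ r) = pvSp T ++ r := by
      cases T with
      | nil =>
          simpa [pvSp] using pv_lstrip_good r [] ⟨hrn, hr⟩
      | cons t T' =>
          have hform : pvSp (t :: T') ++ r = t ++ (' ' :: (pvSp T' ++ r)) := by simp [pvSp]
          rw [hform, pv_lstrip_good t _ (hT t (by simp)), ← hform]
    rw [hls, pv_rstrip_good _ r hrn hr, pvOpt, if_pos hrn, pv_join_append_last]

-- 8. Bridge B's String-level tokens to the char-level tokens.
theorem pv_altTokens_bridge (ws : List String) :
    (pvAltTokens ws).map String.toList = pvAltTokensC (ws.map String.toList) := by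
  have hpred : ((fun v : List Char => v.length == 1) ∘ String.toList) =
      (fun v : String => PySem.Str.len v == 1) := by
    funext v
    simp [PySem.Str.len, Int.natCast_inj]
  induction ws using pvAltTokens.induct with
  | case1 => simp [pvAltTokens, pvAltTokensC]
  | case2 w ws h ih =>
      have h' : ((w.toList.length == 1) = true) := by
        simpa [PySem.Str.len, Int.natCast_inj] using h
      have hrhs : pvAltTokensC (List.map String.toList (w :: ws)) =
          PySem.Chars.join []
            (List.map String.toList (List.takeWhile (fun v => PySem.Str.len v == 1) (w :: ws))) ::
          pvAltTokensC
            (List.map String.toList (List.dropWhile (fun v => PySem.Str.len v == 1) (w :: ws))) := by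
        rw [List.map_cons, pvAltTokensC.eq_def]
        dsimp only
        rw [dif_pos h', ← List.map_cons, List.takeWhile_map, List.dropWhile_map, hpred]
      rw [hrhs, pvAltTokens.eq_def]
      dsimp only
      rw [dif_pos h, List.map_cons, PySem.Str.toList_join, ih]
      rfl
  | case3 w ws h ih =>
      have h'' : ¬ ((w.toList.length == 1) = true) := by
        simpa [PySem.Str.len, Int.natCast_inj] using h
      rw [pvAltTokens.eq_def]
      dsimp only
      rw [dif_neg h, List.map_cons, List.map_cons, pvAltTokensC.eq_def]
      dsimp only
      rw [dif_neg h'', ih]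

-- ===== VERDICT (by name: the statement is the Claim_ definition above) =====
theorem remove_letter_spacing_spec : Claim_equal_remove_letter_spacing := by
  intro text _
  unfold Spec_remove_letter_spacing remove_letter_spacing remove_letter_spacing_alt
  rw [← String.toList_inj]
  simp only []
  set ws := PySem.Str.split₀ text with hws
  set cws := ws.map String.toList with hcws
  have hgood : ∀ w ∈ cws, pvGood w := by
    rw [hcws, hws, PySem.Str.split₀_map_toList]
    exact pv_split₀_good text.toList
  -- A's side
  have hfold := pv_fold_bridge ws "" ""
  set stA := ws.foldl
    (fun (st : String × String) word =>
      if PySem.Str.len word == 1 then (st.1, st.2 ++ word)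
      else
        let joined := if st.2 ≠ "" then st.1 ++ st.2 ++ " " else st.1
        (joined ++ word ++ " ", "")) ("", "") with hstA
  have hfold' : (stA.1.toList, stA.2.toList) = (pvSp (pvAbsT cws []), pvAbsR cws []) := by
    rw [hfold, show ("" : String).toList = [] from rfl, ← hcws, pv_fold_abs cws [] []]
    simp
  have h1 : stA.1.toList = pvSp (pvAbsT cws []) := congrArg Prod.fst hfold'
  have h2 : stA.2.toList = pvAbsR cws [] := congrArg Prod.snd hfold'
  -- the tokens decomposition
  have htok : pvTokP [] cws = pvAbsT cws [] ++ pvOpt (pvAbsR cws []) := pv_tokP_abs cws []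
  have htgood : ∀ t ∈ pvTokP [] cws, pvGood t := pv_tokP_good cws [] (by simp) hgood
  have hTgood : ∀ t ∈ pvAbsT cws [], pvGood t := by
    intro t ht
    exact htgood t (by rw [htok]; exact List.mem_append.mpr (Or.inl ht))
  have hRgood : ∀ c ∈ pvAbsR cws [], PySem.Chars.isspace c = false := by
    intro c hc
    have hrne : pvAbsR cws [] ≠ [] := by
      intro hnil; rw [hnil] at hc; simp at hc
    have : pvAbsR cws [] ∈ pvTokP [] cws := by
      rw [htok, pvOpt, if_pos hrne]
      exact List.mem_append.mpr (Or.inr (by simp))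
    exact (htgood _ this).2 c hc
  have hpre : (if stA.2 ≠ "" then stA.1 ++ stA.2 else stA.1).toList
      = pvSp (pvAbsT cws []) ++ pvAbsR cws [] := by
    by_cases hs : stA.2 = ""
    · have : pvAbsR cws [] = [] := by rw [← h2, hs]; rfl
      simp [hs, h1, this]
    · simp [hs, h1, h2]
  rw [PySem.Str.toList_strip, hpre, pv_strip_main _ _ hTgood hRgood]
  -- B's side
  rw [PySem.Str.toList_join, pv_altTokens_bridge, ← hcws, ← pv_tokP_nil, htok]
  have : " ".toList = [' '] := rfl
  rw [this]
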